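-- pv_equiv track=rewrite | github.com/edt-yxz-zzd/python3_src | nn_ns/RMQ/LeftBiasedRMQ/calc_left_biased_array_min_idx_per_block.py | iter_offseted_left_biased_array_min_idx_per_block
-- ===== SOURCE A (Python) =====
-- from itertools import islice, count
--
-- def left_biased_minimum_query(head, iter_tail):
--     ''':: Ord a => a -> Iter a -> UInt
--
-- what?
--     query the minimum element index of [head, **iter_tail]
--
-- time O(L) * (a.'<' + uint[..L].'+') + O(1) * tail.'iter'
-- see: left_biased_range_minimum_query_definition.py
--
--
-- example:
--     >>> this = left_biased_minimum_query
--     >>> this('1', '')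
--     0
--     >>> this('1', '2')
--     0
--     >>> this('1', '0')
--     1
--     >>> this('1', '20')
--     2
--     >>> this('1', '02')
--     1
--     >>> this('1', '32')
--     0
-- '''
--     min_idx = 0
--     min_x = head
--     for i, x in enumerate(iter_tail, 1):
--         if x < min_x:
--             min_idx = i
--             min_x = x
--     return min_idx
--
-- def iter_offseted_left_biased_array_min_idx_per_block(iterable, block_size):
--     ''':: Ord a => Iter a -> Iter SubArrayIdx
--
--
-- what?
--     query the minimum element index of each block
--         # index of the block subarray, not index of the whole array
--
-- time and space:
--     let L = len elements
--     let B = block_size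
--
--     time O(L) * (a.'<' + uint[..B].'+') + O(1) * elements.'iter'
--     list(output) ~ space bit size O(L/B * log(B))
--
-- input:
--     elements :: Ord a => Iter a
--     block_size :: PInt
-- output:
--     array_min_indices :: Iter ArrayIdx
--         len(array_min_indices) == ceil(len(elements)/block_size)
--         for i in range(len(array_min_indices)):
--             block = elements[block_size*i: block_size*(i+1)]
--             m = min(block)
--             offseted_left_biased_min_idx = block.index(m)
--             assert array_min_indices[i] == offseted_left_biased_min_idx
--
-- see: left_biased_minimum_query
--
-- example:
--     >>> this = iter_offseted_left_biased_array_min_idx_per_block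
--     >>> list_this = lambda it, block_size: list(this(it, block_size))
--     >>> list_this('', 3)
--     []
--     >>> list_this('12', 3)
--     [0]
--     >>> list_this('312', 3)
--     [1]
--     >>> list_this('123406', 3)
--     [0, 1]
--     >>> list_this('1234560', 3)
--     [0, 0, 0]
--
--
-- '''
--     if not block_size > 0: raise ValueError
--     it = iter(iterable)
--     tail_size = block_size-1
--     for block_head in it:
--         block_tail = islice(it, tail_size)
--         offseted_left_biased_min_idx = left_biased_minimum_query(block_head, block_tail)
--         yield offseted_left_biased_min_idx
-- ===== SOURCE B (Python) =====
-- def iter_offseted_left_biased_array_min_idx_per_block(iterable, block_size):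
--     if not block_size > 0:
--         raise ValueError
--     cnt = 0
--     min_idx = 0
--     min_x = None
--     for x in iterable:
--         if cnt == 0:
--             min_idx, min_x = 0, x
--         elif x < min_x:
--             min_idx, min_x = cnt, x
--         cnt += 1
--         if cnt == block_size:
--             yield min_idx
--             cnt = 0
--     if cnt:
--         yield min_idx
-- ===== Notes on version B (the rewrite author's own statement) =====
-- stated objective: alternative
-- what changed: Replaces A's nested structure (outer loop pulling a block head plus an islice'd tail passed to a separate left_biased_minimum_query helper) with a single flat loop over the stream maintaining a position-in-block counter and a running min value/index, yielding and resetting when the counter fills a block and flushing the trailing partial block.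
import Mathlib
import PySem

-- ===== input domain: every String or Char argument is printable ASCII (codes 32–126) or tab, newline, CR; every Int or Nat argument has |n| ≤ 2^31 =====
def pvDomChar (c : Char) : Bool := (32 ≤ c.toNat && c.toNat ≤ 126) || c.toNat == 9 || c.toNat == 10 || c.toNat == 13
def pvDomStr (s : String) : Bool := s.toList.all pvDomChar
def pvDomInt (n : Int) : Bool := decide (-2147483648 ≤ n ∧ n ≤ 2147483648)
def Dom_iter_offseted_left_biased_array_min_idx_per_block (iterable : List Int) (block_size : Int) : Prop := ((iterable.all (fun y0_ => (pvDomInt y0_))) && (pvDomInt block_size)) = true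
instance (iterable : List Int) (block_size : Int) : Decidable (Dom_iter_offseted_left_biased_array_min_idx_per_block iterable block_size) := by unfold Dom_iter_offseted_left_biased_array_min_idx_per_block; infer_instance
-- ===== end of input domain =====

-- B replaces A's per-block (head + islice tail + helper query) structure with one flat loop
-- carrying a position-in-block counter and a running min index/value (objective: alternative).

-- ===== PORT A =====
-- left_biased_minimum_query's enumerate(iter_tail, 1) loop, state (min_idx, min_x), index i
def lbmqGo (i minIdx minX : Int) (tail : List Int) : Int :=
  match tail with
  | [] => minIdx
  | x :: r => if x < minX then lbmqGo (i + 1) i x r else lbmqGo (i + 1) minIdx minX r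

def left_biased_minimum_query (head : Int) (iter_tail : List Int) : Int :=
  lbmqGo 1 0 head iter_tail

-- the generator loop: pull a block head, islice the tail_size-long tail, query, yield
def aGo (bs : Int) (xs : List Int) : List Int :=
  match xs with
  | [] => []
  | h :: t =>
      left_biased_minimum_query h (t.take (bs - 1).toNat) :: aGo bs (t.drop (bs - 1).toNat)
termination_by xs.length
decreasing_by simp [List.length_drop]

-- 'if not block_size > 0: raise ValueError' raises; Pre_ excludes that, the else-branch is dead there
def iter_offseted_left_biased_array_min_idx_per_block (iterable : List Int) (block_size : Int) : List Int :=
  if 0 < block_size then aGo block_size iterable else []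

-- ===== PORT B =====
-- single flat loop of Source B: cnt = position in block, (minIdx, minX) running minimum; flush at end
def bGo (bs : Int) (xs : List Int) (cnt minIdx minX : Int) : List Int :=
  match xs with
  | [] => if cnt ≠ 0 then [minIdx] else []
  | x :: r =>
      let p : Int × Int :=
        if cnt = 0 then (0, x) else if x < minX then (cnt, x) else (minIdx, minX)
      let c := cnt + 1
      if c = bs then p.1 :: bGo bs r 0 p.1 p.2 else bGo bs r c p.1 p.2

def iter_offseted_left_biased_array_min_idx_per_block_alt (iterable : List Int) (block_size : Int) : List Int :=
  if 0 < block_size then bGo block_size iterable 0 0 0 else []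

-- ===== PRECONDITION & SPEC =====
-- A raises ValueError whenever block_size ≤ 0 (and B does too); Pre_ excludes exactly those inputs.
def Pre_iter_offseted_left_biased_array_min_idx_per_block (iterable : List Int) (block_size : Int) : Prop :=
  0 < block_size
instance (iterable : List Int) (block_size : Int) : Decidable (Pre_iter_offseted_left_biased_array_min_idx_per_block iterable block_size) := by unfold Pre_iter_offseted_left_biased_array_min_idx_per_block; infer_instance

def pvWitness_iter_offseted_left_biased_array_min_idx_per_block : List Int × Int := ([3, 1, 2, 2, 0], 2)

def Spec_iter_offseted_left_biased_array_min_idx_per_block (iterable : List Int) (block_size : Int) (out : List Int) : Prop := out = iter_offseted_left_biased_array_min_idx_per_block_alt iterable block_size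
instance (iterable : List Int) (block_size : Int) (out : List Int) : Decidable (Spec_iter_offseted_left_biased_array_min_idx_per_block iterable block_size out) := by unfold Spec_iter_offseted_left_biased_array_min_idx_per_block; infer_instance

-- ===== CLAIM (what is proved, stated in full; the proofs are below) =====
def Claim_equal_iter_offseted_left_biased_array_min_idx_per_block : Prop := ∀ (iterable : List Int) (block_size : Int), Dom_iter_offseted_left_biased_array_min_idx_per_block iterable block_size → Pre_iter_offseted_left_biased_array_min_idx_per_block iterable block_size → Spec_iter_offseted_left_biased_array_min_idx_per_block iterable block_size (iter_offseted_left_biased_array_min_idx_per_block iterable block_size)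

-- ===== LEMMAS AND PROOFS =====

theorem aGo_nil (bs : Int) : aGo bs [] = [] := by rw [aGo.eq_def]

theorem aGo_cons (bs h : Int) (t : List Int) :
    aGo bs (h :: t) =
      left_biased_minimum_query h (t.take (bs - 1).toNat) :: aGo bs (t.drop (bs - 1).toNat) := by
  rw [aGo.eq_def]

-- Invariant tying B's flat loop to A's per-block decomposition: from a fresh block state it
-- reproduces aGo; mid-block (1 ≤ cnt < bs) it finishes the current block (a take) then recurses.
theorem bGo_aGo (bs : Int) (hbs : 0 < bs) (xs : List Int) :
    (∀ a b, bGo bs xs 0 a b = aGo bs xs) ∧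
    (∀ cnt mi mx, 1 ≤ cnt → cnt < bs →
      bGo bs xs cnt mi mx =
        lbmqGo cnt mi mx (xs.take (bs - cnt).toNat) :: aGo bs (xs.drop (bs - cnt).toNat)) := by
  induction xs with
  | nil =>
      constructor
      · intro a b; rw [bGo, aGo_nil]; simp
      · intro cnt mi mx h1 h2
        have hc : ¬ cnt = 0 := by omega
        rw [bGo]
        simp [hc, lbmqGo, aGo_nil]
  | cons x r ih =>
      constructor
      · intro a b
        have e : bGo bs (x :: r) 0 a b =
            if 1 = bs then 0 :: bGo bs r 0 0 x else bGo bs r 1 0 x := by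
          rw [bGo]; norm_num
        rw [e]
        by_cases h1 : (1 : Int) = bs
        · -- bs = 1: the very first element closes its block
          rw [if_pos h1, ih.1, ← h1, aGo_cons]
          norm_num [left_biased_minimum_query, lbmqGo]
        · rw [if_neg h1, ih.2 1 0 x (by omega) (by omega), aGo_cons]
          simp [left_biased_minimum_query]
      · intro cnt mi mx h1 h2
        have hc0 : ¬ cnt = 0 := by omega
        have htk : ((bs - cnt).toNat) = ((bs - (cnt + 1)).toNat) + 1 := by omega
        have e : bGo bs (x :: r) cnt mi mx =
            (if cnt + 1 = bs
              then (if x < mx then (cnt, x) else (mi, mx)).1 ::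
                bGo bs r 0 (if x < mx then (cnt, x) else (mi, mx)).1
                  (if x < mx then (cnt, x) else (mi, mx)).2
              else bGo bs r (cnt + 1) (if x < mx then (cnt, x) else (mi, mx)).1
                  (if x < mx then (cnt, x) else (mi, mx)).2) := by
          rw [bGo]; simp [hc0]
        rw [e, htk]
        by_cases hc : cnt + 1 = bs
        · -- block fills exactly here
          have hbc : (bs - (cnt + 1)).toNat = 0 := by omega
          rw [if_pos hc, hbc]
          by_cases hx : x < mx
          · rw [if_pos hx, ih.1]
            simp [lbmqGo, hx]
          · rw [if_neg hx, ih.1]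
            simp [lbmqGo, hx]
        · -- block continues
          rw [if_neg hc]
          by_cases hx : x < mx
          · rw [if_pos hx, ih.2 (cnt + 1) cnt x (by omega) (by omega)]
            simp [lbmqGo, hx]
          · rw [if_neg hx, ih.2 (cnt + 1) mi mx (by omega) (by omega)]
            simp [lbmqGo, hx]

-- ===== VERDICT (by name: the statement is the Claim_ definition above) =====
theorem iter_offseted_left_biased_array_min_idx_per_block_spec : Claim_equal_iter_offseted_left_biased_array_min_idx_per_block := by
  intro xs bs _ hpre
  unfold Spec_iter_offseted_left_biased_array_min_idx_per_block
  unfold iter_offseted_left_biased_array_min_idx_per_block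
  unfold iter_offseted_left_biased_array_min_idx_per_block_alt
  have hbs : 0 < bs := hpre
  rw [if_pos hbs, if_pos hbs, (bGo_aGo bs hbs xs).1]
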